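-- pv_equiv track=rewrite | github.com/Trixiemisheen/signalforge | processors/nlp.py | detect_remote_work
-- ===== SOURCE A (Python) =====
-- def detect_remote_work(text: str) -> bool:
--     """
--     Detect if job is remote-friendly
--
--     Args:
--         text: Job description or location
--
--     Returns:
--         True if remote work is mentioned
--     """
--     if not text:
--         return False
--
--     text_lower = text.lower()
--     remote_keywords = [
--         "remote", "work from home", "wfh", "distributed", "anywhere",
--         "virtual", "home office", "location independent"
--     ]
--
--     return any(keyword in text_lower for keyword in remote_keywords)
-- ===== SOURCE B (Python) =====
-- REMOTE_KEYWORDS = (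
--     "remote", "work from home", "wfh", "distributed", "anywhere",
--     "virtual", "home office", "location independent",
-- )
--
-- def detect_remote_work(text: str) -> bool:
--     """Single left-to-right scan: at each position of the lowered text,
--     check whether one of the keywords starts there."""
--     if not text:
--         return False
--     low = text.lower()
--     return any(low.startswith(k, i) for i in range(len(low)) for k in REMOTE_KEYWORDS)
-- ===== Notes on version B (the rewrite author's own statement) =====
-- stated objective: alternative
-- what changed: Replaces eight independent substring-membership scans (one per keyword over the whole lowered text) with a single left-to-right positional scan that tests at each index of the lowered text whether some keyword starts there.
import Mathlib
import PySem

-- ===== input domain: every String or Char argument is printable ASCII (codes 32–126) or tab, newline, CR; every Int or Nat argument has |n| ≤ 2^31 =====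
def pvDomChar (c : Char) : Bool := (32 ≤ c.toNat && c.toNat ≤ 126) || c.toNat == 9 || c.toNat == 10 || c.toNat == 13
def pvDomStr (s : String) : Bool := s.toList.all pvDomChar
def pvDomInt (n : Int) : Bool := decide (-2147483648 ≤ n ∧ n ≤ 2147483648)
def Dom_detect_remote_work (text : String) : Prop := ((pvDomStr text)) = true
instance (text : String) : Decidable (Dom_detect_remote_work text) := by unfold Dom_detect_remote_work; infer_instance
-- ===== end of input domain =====

-- ===== PORT A =====
-- B differs from A only in scan shape: one positional left-to-right pass instead of eight membership scans.
-- the keyword list of A, in source order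
def pvKeywordsA : List String :=
  ["remote", "work from home", "wfh", "distributed", "anywhere",
   "virtual", "home office", "location independent"]

def detect_remote_work (text : String) : Bool :=
  if text == "" then false
  else
    let text_lower := PySem.Str.lower text
    pvKeywordsA.any (fun keyword => PySem.Str.isIn keyword text_lower)

-- ===== PORT B =====
-- the same keywords, as character lists (B's tuple of keywords)
def pvKeywordsB : List (List Char) :=
  pvKeywordsA.map String.toList

-- B's scan: at each position (suffix) of the lowered text, does some keyword start there?
def pvScan (s : List Char) : Bool :=
  match s with
  | [] => false
  | _ :: t => pvKeywordsB.any (fun k => k.isPrefixOf s) || pvScan t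

def detect_remote_work_alt (text : String) : Bool :=
  if text == "" then false
  else pvScan (PySem.Str.lower text).toList

-- ===== PRECONDITION & SPEC =====
def Spec_detect_remote_work (text : String) (out : Bool) : Prop := out = detect_remote_work_alt text
instance (text : String) (out : Bool) : Decidable (Spec_detect_remote_work text out) := by unfold Spec_detect_remote_work; infer_instance

-- ===== CLAIM (what is proved, stated in full; the proofs are below) =====
def Claim_equal_detect_remote_work : Prop := ∀ (text : String), Dom_detect_remote_work text → Spec_detect_remote_work text (detect_remote_work text)

-- ===== LEMMAS AND PROOFS =====

-- no keyword is empty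
theorem pvKeywordsB_ne_nil : ∀ k ∈ pvKeywordsB, k ≠ [] := by decide

-- B's scan finds exactly the keywords occurring as infixes
theorem pvScan_iff (s : List Char) :
    pvScan s = true ↔ ∃ k ∈ pvKeywordsB, k <:+: s := by
  induction s with
  | nil =>
    simp only [pvScan]
    constructor
    · intro h; exact absurd h (by simp)
    rintro ⟨k, hk, hinf⟩
    exact absurd (List.eq_nil_of_infix_nil hinf) (pvKeywordsB_ne_nil k hk)
  | cons c t ih =>
    simp only [pvScan, Bool.or_eq_true, List.any_eq_true, ih]
    constructor
    · rintro (⟨k, hk, hp⟩ | ⟨k, hk, hinf⟩)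
      · exact ⟨k, hk, (List.isPrefixOf_iff_prefix.mp hp).isInfix⟩
      · exact ⟨k, hk, hinf.trans (List.suffix_cons c t).isInfix⟩
    · rintro ⟨k, hk, hinf⟩
      rcases List.infix_cons_iff.mp hinf with hp | hinf'
      · exact Or.inl ⟨k, hk, List.isPrefixOf_iff_prefix.mpr hp⟩
      · exact Or.inr ⟨k, hk, hinf'⟩

-- A's membership test finds the same occurrences
theorem pvAnyIsIn_iff (s : String) :
    pvKeywordsA.any (fun keyword => PySem.Str.isIn keyword s) = true ↔
      ∃ k ∈ pvKeywordsB, k <:+: s.toList := by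
  simp only [List.any_eq_true, PySem.Str.isIn_iff_infix, pvKeywordsB, List.mem_map]
  constructor
  · rintro ⟨k, hk, h⟩; exact ⟨k.toList, ⟨k, hk, rfl⟩, h⟩
  · rintro ⟨_, ⟨k, hk, rfl⟩, h⟩; exact ⟨k, hk, h⟩

-- ===== VERDICT (by name: the statement is the Claim_ definition above) =====
theorem detect_remote_work_spec : Claim_equal_detect_remote_work := by
  intro text _
  unfold Spec_detect_remote_work detect_remote_work detect_remote_work_alt
  by_cases h : text == ""
  · simp [h]
  · rw [Bool.eq_iff_iff]
    simp only [h, Bool.false_eq_true, if_false]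
    rw [pvAnyIsIn_iff, pvScan_iff]
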